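-- pv_equiv track=rewrite | github.com/ihgazni2/string-painter | spaint/spaint.py | get_eis_from_sis
-- ===== SOURCE A (Python) =====
-- def get_eis_from_sis(sis,lngth):
--     sis.sort()
--     eis = []
--     for i in range(1,sis.__len__()):
--         ei = sis[i]
--         if(ei<lngth):
--             eis.append(ei)
--         else:
--             eis.append(lngth)
--             break
--     eis.append(lngth - 1)
--     return(eis)
-- ===== SOURCE B (Python) =====
-- def _bisect_left(a, x):
--     lo = 0
--     hi = len(a)
--     while lo < hi:
--         mid = (lo + hi) // 2
--         if a[mid] < x:
--             lo = mid + 1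
--         else:
--             hi = mid
--     return lo
--
-- def get_eis_from_sis(sis, lngth):
--     sis.sort()  # same in-place mutation as the original
--     sub = sis[1:]
--     j = _bisect_left(sub, lngth)
--     eis = sub[:j]
--     if j < len(sub):
--         eis.append(lngth)
--     eis.append(lngth - 1)
--     return eis
-- ===== Notes on version B (the rewrite author's own statement) =====
-- stated objective: alternative
-- what changed: Replaces A's linear scan with break by a binary search (bisect_left) over the sorted tail to find the cut point, then builds the result by slicing; the in-place sort of sis is kept.
import Mathlib
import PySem

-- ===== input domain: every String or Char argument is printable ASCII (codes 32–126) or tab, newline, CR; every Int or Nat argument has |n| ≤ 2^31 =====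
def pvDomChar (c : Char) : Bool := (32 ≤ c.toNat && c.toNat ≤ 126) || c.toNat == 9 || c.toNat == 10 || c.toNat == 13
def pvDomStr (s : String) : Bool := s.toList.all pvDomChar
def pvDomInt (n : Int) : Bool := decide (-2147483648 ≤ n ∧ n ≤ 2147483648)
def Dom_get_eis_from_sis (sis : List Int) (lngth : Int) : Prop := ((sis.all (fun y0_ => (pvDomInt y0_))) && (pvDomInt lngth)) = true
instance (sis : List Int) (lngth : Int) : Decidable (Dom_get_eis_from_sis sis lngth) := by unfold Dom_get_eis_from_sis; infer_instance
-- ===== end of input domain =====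

-- B replaces A's linear scan-with-break by a binary search for the cut point plus slicing
-- (alternative decomposition, not claimed faster overall). Both A and B sort `sis` in place
-- in Python; the equivalence proved here is about the return value.

-- ===== PORT A =====
-- the for-loop over i in range(1, len(sis)) with break, as structural recursion over sis[1:]
def pvLoopA (lngth : Int) : List Int → List Int
  | [] => []
  | ei :: rest => if ei < lngth then ei :: pvLoopA lngth rest else [lngth]

def get_eis_from_sis (sis : List Int) (lngth : Int) : List Int :=
  let s := PySem.List.sorted sis (fun x => x)
  pvLoopA lngth (s.drop 1) ++ [lngth - 1]

-- ===== PORT B =====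
-- hand-written _bisect_left from Source B, step for step (a[mid] is in range whenever hi ≤ a.length)
def pvBisectLeft (a : List Int) (x : Int) (lo hi : Nat) : Nat :=
  if lo < hi then
    let mid := (lo + hi) / 2
    if a.getD mid 0 < x then pvBisectLeft a x (mid + 1) hi else pvBisectLeft a x lo mid
  else lo
termination_by hi - lo
decreasing_by all_goals omega

def get_eis_from_sis_alt (sis : List Int) (lngth : Int) : List Int :=
  let sub := (PySem.List.sorted sis (fun x => x)).drop 1
  let j := pvBisectLeft sub lngth 0 sub.length
  let eis := sub.take j
  (if j < sub.length then eis ++ [lngth] else eis) ++ [lngth - 1]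

-- ===== PRECONDITION & SPEC =====
def Spec_get_eis_from_sis (sis : List Int) (lngth : Int) (out : List Int) : Prop := out = get_eis_from_sis_alt sis lngth
instance (sis : List Int) (lngth : Int) (out : List Int) : Decidable (Spec_get_eis_from_sis sis lngth out) := by unfold Spec_get_eis_from_sis; infer_instance

-- ===== CLAIM (what is proved, stated in full; the proofs are below) =====
def Claim_equal_get_eis_from_sis : Prop := ∀ (sis : List Int) (lngth : Int), Dom_get_eis_from_sis sis lngth → Spec_get_eis_from_sis sis lngth (get_eis_from_sis sis lngth)

-- ===== LEMMAS AND PROOFS =====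

-- A's loop = takeWhile, plus [lngth] iff the loop broke early
lemma pvLoopA_eq (lngth : Int) (l : List Int) :
    pvLoopA lngth l = l.takeWhile (fun a => decide (a < lngth)) ++
      (if (l.takeWhile (fun a => decide (a < lngth))).length < l.length then [lngth] else []) := by
  induction l with
  | nil => simp [pvLoopA]
  | cons x rest ih =>
    by_cases hx : x < lngth
    · simp [pvLoopA, hx, List.takeWhile_cons, ih]
    · simp [pvLoopA, hx, List.takeWhile_cons]

-- on a sorted list, position i holds an element < x iff i is below the takeWhile cut
lemma pv_char (x : Int) (l : List Int) (hs : l.Pairwise (· ≤ ·)) :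
    ∀ i, i < l.length → (l.getD i 0 < x ↔ i < (l.takeWhile (fun a => decide (a < x))).length) := by
  induction l with
  | nil => intro i hi; simp at hi
  | cons y ys ih =>
    rcases List.pairwise_cons.mp hs with ⟨hy, hys⟩
    intro i hi
    by_cases hyx : y < x
    · cases i with
      | zero => simp [List.takeWhile_cons, hyx]
      | succ i =>
        simp only [List.takeWhile_cons, hyx, decide_true, List.length_cons, List.getD_cons_succ]
        rw [ih hys i (by simpa using hi)]
        simp
    · cases i with
      | zero => simp [List.takeWhile_cons, hyx]
      | succ i =>
        have hi' : i < ys.length := by simpa using hi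
        have hmem : ys.getD i 0 ∈ ys := by
          rw [List.getD_eq_getElem ys 0 hi']; exact List.getElem_mem hi'
        have hxy : ¬ (ys.getD i 0 < x) := by have := hy _ hmem; omega
        simp [List.takeWhile_cons, hyx]
        simpa [List.getD] using hxy

-- binary-search invariant: pvBisectLeft finds the unique cut point t
lemma pvBisectLeft_eq (l : List Int) (x : Int) (t : Nat)
    (hchar : ∀ i, i < l.length → (l.getD i 0 < x ↔ i < t)) :
    ∀ d lo hi, hi - lo ≤ d → lo ≤ t → t ≤ hi → hi ≤ l.length → pvBisectLeft l x lo hi = t := by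
  intro d
  induction d with
  | zero =>
    intro lo hi h1 h2 h3 h4
    unfold pvBisectLeft
    rw [if_neg (by omega)]
    omega
  | succ d ih =>
    intro lo hi h1 h2 h3 h4
    unfold pvBisectLeft
    by_cases hlt : lo < hi
    · rw [if_pos hlt]
      have hmid : (lo + hi) / 2 < hi ∧ lo ≤ (lo + hi) / 2 := by omega
      by_cases hv : l.getD ((lo + hi) / 2) 0 < x
      · rw [if_pos hv]
        have ht : (lo + hi) / 2 < t := (hchar _ (by omega)).mp hv
        exact ih _ _ (by omega) (by omega) h3 h4
      · rw [if_neg hv]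
        have ht : t ≤ (lo + hi) / 2 := by
          have := hchar ((lo + hi) / 2) (by omega)
          omega
        exact ih _ _ (by omega) h2 ht (by omega)
    · rw [if_neg hlt]; omega

-- the takeWhile prefix is the take of its own length
lemma pv_take_takeWhile (p : Int → Bool) (l : List Int) :
    l.take (l.takeWhile p).length = l.takeWhile p :=
  (List.prefix_iff_eq_take.mp (List.takeWhile_prefix p)).symm

-- ===== VERDICT (by name: the statement is the Claim_ definition above) =====
theorem get_eis_from_sis_spec : Claim_equal_get_eis_from_sis := by
  intro sis lngth _
  unfold Spec_get_eis_from_sis get_eis_from_sis get_eis_from_sis_alt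
  set L := (PySem.List.sorted sis (fun x => x)).drop 1 with hL
  have hsorted : L.Pairwise (· ≤ ·) := List.Pairwise.drop (PySem.List.sorted_pairwise sis (fun x => x))
  have htle : (L.takeWhile (fun a => decide (a < lngth))).length ≤ L.length :=
    List.IsPrefix.length_le (List.takeWhile_prefix _)
  have hbs : pvBisectLeft L lngth 0 L.length = (L.takeWhile (fun a => decide (a < lngth))).length :=
    pvBisectLeft_eq L lngth _ (pv_char lngth L hsorted) L.length 0 L.length
      (by omega) (by omega) htle (le_refl _)
  show pvLoopA lngth L ++ [lngth - 1] =
    (if pvBisectLeft L lngth 0 L.length < L.length then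
        L.take (pvBisectLeft L lngth 0 L.length) ++ [lngth]
      else L.take (pvBisectLeft L lngth 0 L.length)) ++ [lngth - 1]
  rw [hbs, pv_take_takeWhile, pvLoopA_eq]
  split_ifs <;> simp
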